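-- pv_equiv track=rewrite | github.com/timliakhor/geekbrains_python | lesson3/4.py | my_pow4
-- ===== SOURCE A (Python) =====
-- from typing import Generator
--
-- def my_pow4(x: int, y: int) -> Generator[int, None, None]:
--     yield False, x
--     result: int = x
--     for j in range(1, y):
--         result *= x
--         if j == y - 1:
--             yield True, result
--         else:
--             yield False, result
-- ===== SOURCE B (Python) =====
-- def my_pow4(x: int, y: int):
--     # Phase 1: build the whole power list [x^1, ..., x^max(y,1)] up front.
--     # Phase 2: emit all but the last with a False flag via a slice, then the
--     # last element with flag (y >= 2). No flag logic inside the build loop.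
--     n = max(y, 1)
--     powers = [x]
--     for _ in range(1, n):
--         powers.append(powers[-1] * x)
--     for p in powers[:-1]:
--         yield (False, p)
--     yield (y >= 2, powers[-1])
-- ===== Notes on version B (the rewrite author's own statement) =====
-- stated objective: alternative
-- what changed: B separates the work into two phases: it first builds the whole power list [x^1..x^max(y,1)] with a flag-free append loop, then attaches flags afterwards - all of powers[:-1] get False via a slice and the last element gets the flag y>=2 - replacing A's single loop that carries a running product and decides each flag with j == y-1 inside the loop.
import Mathlib
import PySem

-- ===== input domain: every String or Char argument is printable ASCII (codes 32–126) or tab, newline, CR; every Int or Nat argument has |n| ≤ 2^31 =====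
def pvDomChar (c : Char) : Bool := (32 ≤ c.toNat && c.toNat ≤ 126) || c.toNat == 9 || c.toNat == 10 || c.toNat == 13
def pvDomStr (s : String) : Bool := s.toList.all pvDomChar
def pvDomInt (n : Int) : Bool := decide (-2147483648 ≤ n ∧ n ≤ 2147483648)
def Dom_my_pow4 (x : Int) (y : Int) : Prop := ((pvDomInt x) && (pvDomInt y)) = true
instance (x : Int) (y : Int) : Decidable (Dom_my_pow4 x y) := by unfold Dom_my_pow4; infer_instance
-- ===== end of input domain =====

-- ===== PORT A =====
def my_pow4 (x : Int) (y : Int) : List (Bool × Int) :=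
  -- generator collected as a list: out starts with the first yield; the for-loop is a foldl
  -- over range(1, y) carrying (out, result)
  (((PySem.List.pyRange 1 y 1).foldl
      (fun (st : List (Bool × Int) × Int) j =>
        let result := st.2 * x
        if j = y - 1 then (st.1 ++ [(true, result)], result)
        else (st.1 ++ [(false, result)], result))
      ([(false, x)], x))).1

-- ===== PORT B =====
-- Header: B prebuilds the power list and attaches flags afterwards; equivalence is about the
-- returned (collected) sequence of yields.
def my_pow4_alt (x : Int) (y : Int) : List (Bool × Int) :=
  let n := max y 1
  -- phase 1: powers = [x]; for _ in range(1, n): powers.append(powers[-1] * x)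
  let powers := (PySem.List.pyRange 1 n 1).foldl
    (fun (ps : List Int) _ => ps ++ [ps.getLast! * x]) [x]
  -- phase 2: powers[:-1] each with False, then powers[-1] with flag y >= 2 (powers nonempty, n ≥ 1)
  (PySem.List.slice powers none (some (-1))).map (fun p => (false, p))
    ++ [(decide (y ≥ 2), (PySem.List.pyGet? powers (-1)).getD 0)]

-- ===== PRECONDITION & SPEC =====
def Spec_my_pow4 (x : Int) (y : Int) (out : List (Bool × Int)) : Prop := out = my_pow4_alt x y
instance (x : Int) (y : Int) (out : List (Bool × Int)) : Decidable (Spec_my_pow4 x y out) := by unfold Spec_my_pow4; infer_instance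

-- ===== CLAIM (what is proved, stated in full; the proofs are below) =====
def Claim_equal_my_pow4 : Prop := ∀ (x : Int) (y : Int), Dom_my_pow4 x y → Spec_my_pow4 x y (my_pow4 x y)

-- ===== LEMMAS AND PROOFS =====

-- ===== VERDICT (by name: the statement is the Claim_ definition above) =====
lemma foldA (x y : Int) : ∀ (m : Nat) (acc : List (Bool × Int)) (r : Int),
    (((List.range m).map (fun (k : Nat) => (1 : Int) + (k : Int))).foldl
      (fun (st : List (Bool × Int) × Int) j =>
        let result := st.2 * x
        if j = y - 1 then (st.1 ++ [(true, result)], result)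
        else (st.1 ++ [(false, result)], result))
      (acc, r))
    = (acc ++ (List.range m).map (fun (k : Nat) => (decide ((1 : Int) + (k : Int) = y - 1), r * x ^ (k + 1))),
       r * x ^ m) := by
  intro m
  induction m with
  | zero => intro acc r; simp
  | succ m ih =>
    intro acc r
    rw [List.range_succ, List.map_append, List.foldl_append, ih]
    simp only [List.foldl, List.map_append, List.map_cons, List.map_nil]
    split_ifs with h <;>
      simp [h, pow_succ, List.append_assoc, mul_assoc]

lemma shiftFalse (x : Int) (m : Nat) :
    (false, x) :: (List.range m).map (fun k => (false, x * x ^ (k + 1)))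
      = (List.range (m + 1)).map (fun (k : Nat) => ((false : Bool), x ^ (k + 1))) := by
  rw [List.range_succ_eq_map]
  simp only [List.map_cons, List.map_map]
  congr 1
  · norm_num
  · apply List.map_congr_left
    intro k _
    simp only [Function.comp, Nat.succ_eq_add_one, Prod.mk.injEq, true_and]
    ring

lemma foldPow (x : Int) : ∀ (m : Nat),
    (((List.range m).map (fun (k : Nat) => (1 : Int) + (k : Int))).foldl
      (fun (ps : List Int) _ => ps ++ [ps.getLast! * x]) [x])
    = (List.range (m + 1)).map (fun (k : Nat) => x ^ (k + 1)) := by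
  intro m
  induction m with
  | zero => simp
  | succ m ih =>
    rw [List.range_succ (n := m), List.map_append, List.foldl_append, ih]
    simp only [List.foldl, List.map_cons, List.map_nil]
    have hl : ((List.range (m + 1)).map (fun (k : Nat) => x ^ (k + 1))).getLast!
        = x ^ (m + 1) := by
      rw [List.range_succ (n := m), List.map_append]
      simp
    rw [hl, List.range_succ (n := m + 1), List.map_append (l₁ := List.range (m + 1))]
    simp [pow_succ]

theorem my_pow4_spec : Claim_equal_my_pow4 := by
  unfold Claim_equal_my_pow4 Spec_my_pow4
  intro x y _
  unfold my_pow4 my_pow4_alt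
  dsimp only
  rw [PySem.List.pyRange_one, PySem.List.pyRange_one, foldA]
  rw [PySem.List.slice_to_neg_one, PySem.List.pyGet?_neg_one, foldPow]
  by_cases hy : y ≤ 1
  · have h1 : (y - 1).toNat = 0 := by omega
    have h2b : (max y 1 - 1).toNat = 0 := by omega
    have h3 : ¬ (y ≥ 2) := by omega
    simp [h1, h2b, h3]
  · have hy2 : 2 ≤ y := by omega
    obtain ⟨mm, hmm⟩ : ∃ mm, (y - 1).toNat = mm + 1 := ⟨(y - 2).toNat, by omega⟩
    have hn : (max y 1 - 1).toNat = mm + 1 := by omega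
    have hflag : (y ≥ 2) = True := by simp [hy2]
    rw [hmm, hn]
    have e1 : List.range (mm + 1 + 1) = List.range (mm + 1) ++ [mm + 1] := List.range_succ
    simp only [e1, List.map_append, List.dropLast_concat, List.getLast?_concat,
               List.map_cons, List.map_nil, Option.getD_some, hflag, decide_true]
    rw [List.range_succ (n := mm)]
    simp only [List.map_append, List.map_cons, List.map_nil]
    have hlast : ((1 : Int) + (mm : Int) = y - 1) = True := by
      simp only [eq_iff_iff, iff_true]; omega
    have hrest : (List.range mm).map
          (fun (k : Nat) => (decide ((1 : Int) + (k : Int) = y - 1), x * x ^ (k + 1)))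
        = (List.range mm).map (fun (k : Nat) => ((false : Bool), x * x ^ (k + 1))) := by
      apply List.map_congr_left
      intro k hk
      have hk2 : k < mm := List.mem_range.mp hk
      have hne : ¬ ((1 : Int) + (k : Int) = y - 1) := by omega
      simp [hne]
    simp only [hrest, hlast, decide_true]
    have hpre : ((false, x) :: (List.range mm).map
          (fun (k : Nat) => ((false : Bool), x * x ^ (k + 1))))
        = (List.range mm).map (fun (k : Nat) => ((false : Bool), x ^ (k + 1)))
          ++ [((false : Bool), x ^ (mm + 1))] := by
      have h := shiftFalse x mm
      rw [List.range_succ] at h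
      rw [h, List.map_append]
      simp
    rw [List.singleton_append, ← List.cons_append, hpre]
    simp [Function.comp, pow_succ, mul_comm, List.append_assoc]
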